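-- pv_equiv track=rewrite | github.com/miron-alexandru/Coding-Problems_Python-Solutions | Leetcode Solutions/DailyChallenges/2025/March/maximum-candies-allocated-to-k-children.py | maximumCandies
-- ===== SOURCE A (Python) =====
-- from typing import List
--
-- def maximumCandies(candies: List[int], k: int) -> int:
--     if sum(candies) < k:
--         return 0
--
--     low, high = 1, max(candies)
--     res = 0
--
--     def canDistribute(x):
--         return sum(c // x for c in candies) >= k
--
--     while low <= high:
--         mid = (low + high) // 2
--         if canDistribute(mid):
--             res = mid  # Store valid answer
--             low = mid + 1  # Try for more candies per child
--         else:
--             high = mid - 1  # Reduce the possible value of x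
--
--     return res
-- ===== SOURCE B (Python) =====
-- from typing import List
--
-- def maximumCandies(candies: List[int], k: int) -> int:
--     if sum(candies) < k:
--         return 0
--     x = max(candies)
--     while x > 0:
--         if sum(c // x for c in candies) >= k:
--             return x
--         # skip straight to the next value below x where some quotient c // x changes
--         x = max(c // (c // x + 1) for c in candies)
--     return 0
-- ===== Notes on version B (the rewrite author's own statement) =====
-- stated objective: alternative
-- what changed: Replaces the bisection-on-the-answer loop with a descending scan over per-child amounts that jumps directly between quotient breakpoints (values where some c//x changes) and returns the first feasible amount.
-- outside the precondition, e.g. on maximumCandies([18, -6, -5], 1): A returns 3, B raises ZeroDivisionError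
import Mathlib
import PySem

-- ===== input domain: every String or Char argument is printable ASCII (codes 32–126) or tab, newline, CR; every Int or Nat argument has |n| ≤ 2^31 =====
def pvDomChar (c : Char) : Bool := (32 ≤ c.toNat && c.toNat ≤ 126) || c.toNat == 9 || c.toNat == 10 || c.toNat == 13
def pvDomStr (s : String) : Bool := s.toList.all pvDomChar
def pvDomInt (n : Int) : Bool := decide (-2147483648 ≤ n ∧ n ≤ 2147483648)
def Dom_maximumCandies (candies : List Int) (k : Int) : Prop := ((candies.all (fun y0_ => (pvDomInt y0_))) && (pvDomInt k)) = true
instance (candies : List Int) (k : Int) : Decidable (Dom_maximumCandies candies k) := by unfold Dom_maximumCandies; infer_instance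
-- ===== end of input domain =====

-- B replaces A's bisection over the answer with a descending scan that jumps between quotient
-- breakpoints and returns the first feasible per-child amount (an alternative algorithm, not faster).

-- ===== PORT A =====
-- sum(c // x for c in candies) >= k
def pvCanDistribute (candies : List Int) (k x : Int) : Bool :=
  decide (k ≤ candies.foldl (fun s c => s + PySem.Int.floordiv c x) 0)

-- termination measures for the while-loop below (cited by name in its decreasing_by)
lemma pvMidLt1 (low high : Int) (h : low ≤ high) :
    (high + 1 - (PySem.Int.floordiv (low + high) 2 + 1)).toNat < (high + 1 - low).toNat := by
  have := PySem.Int.floordiv_two_mid_bounds h; omega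

lemma pvMidLt2 (low high : Int) (h : low ≤ high) :
    (PySem.Int.floordiv (low + high) 2 - 1 + 1 - low).toNat < (high + 1 - low).toNat := by
  have := PySem.Int.floordiv_two_mid_bounds h; omega

-- while low <= high: mid = (low+high)//2; …
def pvALoop (candies : List Int) (k low high res : Int) : Int :=
  if h : low ≤ high then
    let mid := PySem.Int.floordiv (low + high) 2
    if pvCanDistribute candies k mid then
      pvALoop candies k (mid + 1) high mid
    else
      pvALoop candies k low (mid - 1) res
  else res
termination_by (high + 1 - low).toNat
decreasing_by
  · exact pvMidLt1 low high h
  · exact pvMidLt2 low high h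

def maximumCandies (candies : List Int) (k : Int) : Int :=
  if candies.foldl (fun s c => s + c) 0 < k then 0
  else
    match PySem.List.max? candies (fun x => x) with
    | some m => pvALoop candies k 1 m 0
    | none => 0   -- Python raises ValueError (max of empty list) here; excluded by Pre_

-- ===== PORT B =====
-- x = max(c // (c // x + 1) for c in candies): the next value below x where some quotient changes
-- (the Python max(...) raises on an empty list, unreachable when the loop runs; .getD 0 is that stub)
def pvBStep (candies : List Int) (x : Int) : Int :=
  (PySem.List.max? (candies.map
      (fun c => PySem.Int.floordiv c (PySem.Int.floordiv c x + 1))) (fun y => y)).getD 0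

-- while x > 0: if sum(c // x for c in candies) >= k: return x; x = <pvBStep>; return 0
-- fuel only makes the loop total: inside Pre_ x strictly decreases, so fuel never runs out
def pvBLoop (candies : List Int) (k : Int) : Nat → Int → Int
  | 0, _ => 0
  | fuel + 1, x =>
    if 0 < x then
      if decide (k ≤ candies.foldl (fun s c => s + PySem.Int.floordiv c x) 0) then x
      else pvBLoop candies k fuel (pvBStep candies x)
    else 0

def maximumCandies_alt (candies : List Int) (k : Int) : Int :=
  if candies.foldl (fun s c => s + c) 0 < k then 0
  else
    pvBLoop candies k (((PySem.List.max? candies (fun x => x)).getD 0).toNat + 1)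
      ((PySem.List.max? candies (fun x => x)).getD 0)
    -- Python B also raises on max([]) here; excluded by Pre_

-- ===== PRECONDITION & SPEC =====
-- Pre_ admits lists of nonnegative counts (the problem's natural domain) and, for any signs,
-- inputs with sum(candies) < k, where both programs return 0 before any division. It excludes
-- the empty list with k ≤ 0 (both Pythons raise ValueError on max([])) and lists holding a
-- negative count with sum ≥ k: feasibility is non-monotone there, so A's bisection value is an
-- accident of the search path, and B's quotient step divides by zero.
def Pre_maximumCandies (candies : List Int) (k : Int) : Prop :=
  (candies = [] → 0 < k) ∧ ((∀ c ∈ candies, 0 ≤ c) ∨ candies.sum < k)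
instance (candies : List Int) (k : Int) : Decidable (Pre_maximumCandies candies k) := by
  unfold Pre_maximumCandies; infer_instance

def pvWitness_maximumCandies : List Int × Int := ([5, 8, 6], 3)

def Spec_maximumCandies (candies : List Int) (k : Int) (out : Int) : Prop :=
  out = maximumCandies_alt candies k
instance (candies : List Int) (k : Int) (out : Int) : Decidable (Spec_maximumCandies candies k out) := by
  unfold Spec_maximumCandies; infer_instance

-- ===== CLAIM (what is proved, stated in full; the proofs are below) =====
def Claim_equal_maximumCandies : Prop := ∀ (candies : List Int) (k : Int), Dom_maximumCandies candies k → Pre_maximumCandies candies k → Spec_maximumCandies candies k (maximumCandies candies k)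

-- ===== LEMMAS AND PROOFS =====

-- floor division by a larger positive divisor gives a smaller quotient (for a nonnegative dividend)
lemma pvFloordiv_antitone (c a b : Int) (hc : 0 ≤ c) (ha : 1 ≤ a) (hab : a ≤ b) :
    PySem.Int.floordiv c b ≤ PySem.Int.floordiv c a := by
  have hb : (0:Int) < b := by omega
  have h1 : PySem.Int.floordiv c b * b ≤ c :=
    (PySem.Int.le_floordiv_iff_mul_le hb).mp le_rfl
  have h0 : 0 ≤ PySem.Int.floordiv c b :=
    (PySem.Int.le_floordiv_iff_mul_le hb).mpr (by simpa using hc)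
  have h2 : PySem.Int.floordiv c b * a ≤ PySem.Int.floordiv c b * b :=
    mul_le_mul_of_nonneg_left hab h0
  exact (PySem.Int.le_floordiv_iff_mul_le (by omega)).mpr (le_trans h2 h1)

lemma pvFloordiv_nonneg (c b : Int) (hc : 0 ≤ c) (hb : 0 < b) :
    0 ≤ PySem.Int.floordiv c b :=
  (PySem.Int.le_floordiv_iff_mul_le hb).mpr (by simpa using hc)

lemma pvFoldl_sum (g : Int → Int) (l : List Int) :
    ∀ s : Int, l.foldl (fun s c => s + g c) s = s + (l.map g).sum := by
  induction l with
  | nil => intro s; simp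
  | cons c t ih => intro s; simp [List.foldl_cons, ih (s + g c)]; ring

-- reference form of the descending scan used only by these proofs: steps by 1
def pvRefScan (candies : List Int) (k x : Int) : Int :=
  if h : 0 < x then
    if pvCanDistribute candies k x then x
    else pvRefScan candies k (x - 1)
  else 0
termination_by x.toNat

-- feasibility is antitone in x on nonnegative candy lists
lemma pvFeas_antitone (candies : List Int) (k : Int) (hc : ∀ c ∈ candies, 0 ≤ c)
    (a b : Int) (ha : 1 ≤ a) (hab : a ≤ b) :
    pvCanDistribute candies k b = true → pvCanDistribute candies k a = true := by
  intro hfb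
  have hb := of_decide_eq_true hfb
  rw [pvFoldl_sum] at hb
  apply decide_eq_true
  rw [pvFoldl_sum]
  have : ((candies.map (fun c => PySem.Int.floordiv c b)).sum
        ≤ (candies.map (fun c => PySem.Int.floordiv c a)).sum) :=
    List.sum_le_sum (fun c hm => pvFloordiv_antitone c a b (hc c hm) ha hab)
  omega

-- the reference scan skips over a stretch of infeasible values
lemma pvScan_skip (candies : List Int) (k : Int) :
    ∀ (n : Nat) (h : Int), 0 ≤ h →
      (∀ y, h < y → y ≤ h + n → pvCanDistribute candies k y = false) →
      pvRefScan candies k (h + n) = pvRefScan candies k h := by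
  intro n
  induction n with
  | zero => intro h _ _; simp
  | succ n ih =>
    intro h h0 hf
    have hx : (0:Int) < h + (n+1:Nat) := by push_cast; omega
    rw [pvRefScan, dif_pos hx]
    have : pvCanDistribute candies k (h + (n+1:Nat)) = false :=
      hf _ (by push_cast; omega) le_rfl
    rw [this]
    simp only [Bool.false_eq_true, if_false]
    have he : h + (n+1:Nat) - 1 = h + (n:Nat) := by push_cast; ring
    rw [he]
    exact ih h h0 (fun y hy1 hy2 => hf y hy1 (by push_cast at hy2 ⊢; omega))

lemma pvScan_skip' (candies : List Int) (k m h : Int) (h0 : 0 ≤ h) (hm : h ≤ m)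
    (hf : ∀ y, h < y → y ≤ m → pvCanDistribute candies k y = false) :
    pvRefScan candies k m = pvRefScan candies k h := by
  obtain ⟨n, hn⟩ : ∃ n : Nat, m = h + n := ⟨(m - h).toNat, by omega⟩
  subst hn
  exact pvScan_skip candies k n h h0 hf

-- A's binary search equals the reference scan, by the loop invariant
lemma pvLoop_eq (candies : List Int) (k M : Int)
    (hanti : ∀ a b, 1 ≤ a → a ≤ b → pvCanDistribute candies k b = true →
              pvCanDistribute candies k a = true) :
    ∀ (N : Nat) (low high res : Int), (high + 1 - low).toNat ≤ N →
      1 ≤ low → low ≤ high + 1 → res = low - 1 →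
      (res = 0 ∨ pvCanDistribute candies k res = true) →
      high ≤ M →
      (∀ y, high < y → y ≤ M → pvCanDistribute candies k y = false) →
      pvALoop candies k low high res = pvRefScan candies k M := by
  intro N
  induction N with
  | zero =>
    intro low high res hN h1 h2 hres hgood hM hout
    have hlh : ¬ low ≤ high := by omega
    rw [pvALoop, dif_neg hlh]
    have hres' : res = high := by omega
    have h0 : 0 ≤ high := by omega
    rw [pvScan_skip' candies k M high h0 hM hout]
    by_cases hz : high = 0
    · rw [pvRefScan, dif_neg (by omega)]; omega
    · have hpos : 0 < high := by omega
      have hfh : pvCanDistribute candies k high = true := by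
        rcases hgood with h | h
        · omega
        · rwa [hres'] at h
      rw [pvRefScan, dif_pos hpos, hfh]
      simp [hres']
  | succ N ih =>
    intro low high res hN h1 h2 hres hgood hM hout
    by_cases hlh : low ≤ high
    · rw [pvALoop, dif_pos hlh]
      have hmid := PySem.Int.floordiv_two_mid_bounds hlh
      set mid := PySem.Int.floordiv (low + high) 2 with hmiddef
      by_cases hfm : pvCanDistribute candies k mid = true
      · simp only [hfm, if_true]
        exact ih (mid + 1) high mid (by omega) (by omega) (by omega) (by omega)
          (Or.inr hfm) hM hout
      · rw [Bool.not_eq_true] at hfm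
        simp only [hfm, Bool.false_eq_true, if_false]
        refine ih low (mid - 1) res (by omega) h1 (by omega) hres hgood (by omega) ?_
        intro y hy1 hy2
        by_cases hyh : y ≤ high
        · rw [← Bool.not_eq_true]
          intro hfy
          have := hanti mid y (by omega) (by omega) hfy
          rw [this] at hfm
          exact absurd hfm (by simp)
        · exact hout y (by omega) hy2
    · exact ih low high res (by omega) h1 h2 hres hgood hM hout

-- a quotient is unchanged anywhere strictly between its breakpoint c//(c//x+1) and x
lemma pvQuot_eq (c x y : Int) (hc : 0 ≤ c) (hy : 0 < y) (hxy : y ≤ x)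
    (hskip : PySem.Int.floordiv c (PySem.Int.floordiv c x + 1) < y) :
    PySem.Int.floordiv c y = PySem.Int.floordiv c x := by
  have hx : (0:Int) < x := by omega
  have hq0 : 0 ≤ PySem.Int.floordiv c x := pvFloordiv_nonneg c x hc hx
  have h1 : PySem.Int.floordiv c x ≤ PySem.Int.floordiv c y :=
    pvFloordiv_antitone c y x hc (by omega) hxy
  have h2 : c < y * (PySem.Int.floordiv c x + 1) :=
    (PySem.Int.floordiv_lt_iff_lt_mul (by omega)).mp hskip
  have h3 : PySem.Int.floordiv c y < PySem.Int.floordiv c x + 1 :=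
    (PySem.Int.floordiv_lt_iff_lt_mul hy).mpr (by rw [mul_comm] at h2; exact h2)
  omega

-- the breakpoint jump lands strictly below x and not below 0
lemma pvBStep_bounds (candies : List Int) (x : Int) (hne : candies ≠ [])
    (hc : ∀ c ∈ candies, 0 ≤ c) (hx : 0 < x) :
    0 ≤ pvBStep candies x ∧ pvBStep candies x < x ∧
      (∀ c ∈ candies,
        PySem.Int.floordiv c (PySem.Int.floordiv c x + 1) ≤ pvBStep candies x) := by
  have hglt : ∀ c ∈ candies, PySem.Int.floordiv c (PySem.Int.floordiv c x + 1) < x := by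
    intro c hm
    have hq0 : 0 ≤ PySem.Int.floordiv c x := pvFloordiv_nonneg c x (hc c hm) hx
    refine (PySem.Int.floordiv_lt_iff_lt_mul (by omega)).mpr ?_
    have : PySem.Int.floordiv c x < PySem.Int.floordiv c x + 1 := by omega
    have h4 := (PySem.Int.floordiv_lt_iff_lt_mul hx).mp this
    rw [mul_comm] at h4
    exact h4
  have hmapne : candies.map
      (fun c => PySem.Int.floordiv c (PySem.Int.floordiv c x + 1)) ≠ [] := by
    simpa using hne
  obtain ⟨v, hv⟩ : ∃ v, PySem.List.max? (candies.map
      (fun c => PySem.Int.floordiv c (PySem.Int.floordiv c x + 1))) (fun y => y) = some v := by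
    cases hmax : PySem.List.max? (candies.map
        (fun c => PySem.Int.floordiv c (PySem.Int.floordiv c x + 1))) (fun y => y) with
    | none => exact absurd ((PySem.List.max?_eq_none_iff _ _).mp hmax) hmapne
    | some v => exact ⟨v, rfl⟩
  have hstep : pvBStep candies x = v := by
    rw [pvBStep, hv]; rfl
  obtain ⟨c0, hc0, hvc0⟩ := List.mem_map.mp (PySem.List.max?_mem hv)
  have hmax := PySem.List.max?_isMax hv
  refine ⟨?_, ?_, ?_⟩
  · rw [hstep, ← hvc0]
    exact pvFloordiv_nonneg c0 _ (hc c0 hc0)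
      (by have := pvFloordiv_nonneg c0 x (hc c0 hc0) hx; omega)
  · rw [hstep, ← hvc0]
    exact hglt c0 hc0
  · intro c hm
    rw [hstep]
    exact hmax _ (List.mem_map.mpr ⟨c, hm, rfl⟩)

-- B's skipping loop equals the reference scan
lemma pvBLoop_eq (candies : List Int) (k : Int) (hne : candies ≠ [])
    (hc : ∀ c ∈ candies, 0 ≤ c) :
    ∀ (fuel : Nat) (x : Int), x.toNat < fuel →
      pvBLoop candies k fuel x = pvRefScan candies k x := by
  intro fuel
  induction fuel with
  | zero => intro x h; omega
  | succ fuel ih =>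
    intro x hfx
    show (if 0 < x then
        if decide (k ≤ candies.foldl (fun s c => s + PySem.Int.floordiv c x) 0) then x
        else pvBLoop candies k fuel (pvBStep candies x)
      else 0) = pvRefScan candies k x
    by_cases hx : 0 < x
    · rw [if_pos hx]
      rw [show (decide (k ≤ candies.foldl (fun s c => s + PySem.Int.floordiv c x) 0))
            = pvCanDistribute candies k x from rfl]
      by_cases hf : pvCanDistribute candies k x = true
      · rw [hf, pvRefScan, dif_pos hx, hf]
        simp
      · rw [Bool.not_eq_true] at hf
        rw [hf]
        simp only [Bool.false_eq_true, if_false]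
        obtain ⟨hs0, hsx, hsmax⟩ := pvBStep_bounds candies x hne hc hx
        have hskip : pvRefScan candies k x = pvRefScan candies k (pvBStep candies x) := by
          refine pvScan_skip' candies k x (pvBStep candies x) hs0 (by omega) ?_
          intro y hy1 hy2
          have hcongr : candies.map (fun c => PySem.Int.floordiv c y)
              = candies.map (fun c => PySem.Int.floordiv c x) :=
            List.map_congr_left (fun c hm =>
              pvQuot_eq c x y (hc c hm) (by omega) hy2
                (lt_of_le_of_lt (hsmax c hm) hy1))
          rw [pvCanDistribute, pvFoldl_sum, hcongr, ← pvFoldl_sum]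
          exact hf
        rw [hskip]
        exact ih (pvBStep candies x) (by omega)
    · rw [if_neg hx, pvRefScan, dif_neg hx]

-- ===== VERDICT (by name: the statement is the Claim_ definition above) =====
theorem maximumCandies_spec : Claim_equal_maximumCandies := by
  intro candies k _ hpre
  unfold Spec_maximumCandies maximumCandies maximumCandies_alt
  by_cases hs : candies.foldl (fun s c => s + c) 0 < k
  · rw [if_pos hs, if_pos hs]
  · rw [if_neg hs, if_neg hs]
    have hsum : candies.foldl (fun s c => s + c) 0 = candies.sum := by
      simpa using pvFoldl_sum (fun c => c) candies 0
    have hnn : ∀ c ∈ candies, 0 ≤ c := by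
      rcases hpre.2 with h | h
      · exact h
      · rw [hsum] at hs; omega
    have hne : candies ≠ [] := by
      intro h
      subst h
      simp at hs
      have := hpre.1 rfl
      omega
    obtain ⟨m, hm⟩ : ∃ m, PySem.List.max? candies (fun x => x) = some m := by
      cases hmax : PySem.List.max? candies (fun x => x) with
      | none => exact absurd ((PySem.List.max?_eq_none_iff candies (fun x => x)).mp hmax) hne
      | some m => exact ⟨m, rfl⟩
    rw [hm]
    have hm0 : 0 ≤ m := hnn m (PySem.List.max?_mem hm)
    simp only [Option.getD_some]
    rw [pvBLoop_eq candies k hne hnn (m.toNat + 1) m (by omega)]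
    exact pvLoop_eq candies k m
      (fun a b ha hab => pvFeas_antitone candies k hnn a b ha hab)
      (m + 1 - 1).toNat 1 m 0 (by omega) (by omega) (by omega) (by omega)
      (Or.inl rfl) le_rfl (fun y h1 h2 => absurd (lt_of_lt_of_le h1 h2) (lt_irrefl m))
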